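-- pv_equiv track=rewrite | github.com/BABTUNA/marky | trends_intel/agent.py | _determine_season
-- ===== SOURCE A (Python) =====
-- from typing import List, Optional, Dict, Any
--
-- SHORT_MONTHS = {
--     1: "Jan", 2: "Feb", 3: "Mar", 4: "Apr",
--     5: "May", 6: "Jun", 7: "Jul", 8: "Aug",
--     9: "Sep", 10: "Oct", 11: "Nov", 12: "Dec",
-- }
--
-- SEASONS = {
--     "Winter": [12, 1, 2],
--     "Spring": [3, 4, 5],
--     "Summer": [6, 7, 8],
--     "Fall": [9, 10, 11],
-- }
--
-- def _determine_season(months: List[int]) -> str: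
--     """Determine which season best matches the given months."""
--     if not months:
--         return "Year-round"
--
--     season_scores = {}
--     for season, season_months in SEASONS.items():
--         overlap = len(set(months) & set(season_months))
--         season_scores[season] = overlap
--
--     best_season = max(season_scores, key=season_scores.get)
--     month_names = [SHORT_MONTHS[m] for m in sorted(months)]
--
--     if season_scores[best_season] >= 2:
--         return f"{best_season} ({', '.join(month_names)})"
--     else:
--         return f"{', '.join(month_names)}"
-- ===== SOURCE B (Python) =====
-- from typing import List
--
-- SHORT_MONTHS = {
--     1: "Jan", 2: "Feb", 3: "Mar", 4: "Apr",
--     5: "May", 6: "Jun", 7: "Jul", 8: "Aug",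
--     9: "Sep", 10: "Oct", 11: "Nov", 12: "Dec",
-- }
--
-- def _determine_season(months: List[int]) -> str:
--     """Single arithmetic pass over the distinct months: four integer range
--     counters instead of per-season set intersections, then a comparison
--     chain instead of max(dict, key=...)."""
--     if not months:
--         return "Year-round"
--
--     w = sp = su = f = 0
--     for m in set(months):
--         if m == 12 or m <= 2:
--             w += 1
--         elif m <= 5:
--             sp += 1
--         elif m <= 8:
--             su += 1
--         elif m <= 11:
--             f += 1
--
--     if w >= sp and w >= su and w >= f:
--         best, score = "Winter", w
--     elif sp >= su and sp >= f:
--         best, score = "Spring", sp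
--     elif su >= f:
--         best, score = "Summer", su
--     else:
--         best, score = "Fall", f
--
--     names = ", ".join(SHORT_MONTHS[m] for m in sorted(months))
--     return f"{best} ({names})" if score >= 2 else names
-- ===== Notes on version B (the rewrite author's own statement) =====
-- stated objective: alternative
-- what changed: Replaces the per-season set-intersection scoring dict and max(dict, key=get) with one arithmetic pass over the distinct months keeping four integer range counters, and a comparison chain that picks the first maximal season.
import Mathlib
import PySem

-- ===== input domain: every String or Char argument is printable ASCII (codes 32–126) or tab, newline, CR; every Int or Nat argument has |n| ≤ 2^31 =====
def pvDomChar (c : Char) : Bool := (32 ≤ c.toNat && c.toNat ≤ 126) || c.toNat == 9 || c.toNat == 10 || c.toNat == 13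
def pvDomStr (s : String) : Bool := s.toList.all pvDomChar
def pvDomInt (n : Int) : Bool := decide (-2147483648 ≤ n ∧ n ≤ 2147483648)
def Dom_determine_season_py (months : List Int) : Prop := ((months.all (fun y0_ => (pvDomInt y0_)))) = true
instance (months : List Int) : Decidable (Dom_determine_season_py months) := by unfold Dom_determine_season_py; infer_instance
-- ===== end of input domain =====

-- B replaces A's per-season set intersections and max(dict,key=get) by one counting pass
-- over the distinct months with four integer range counters and a comparison chain (alternative, same cost).

-- ===== PORT A =====
-- SHORT_MONTHS as an association list (shared module constant, used by both ports' formatting)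
def pyShortMonths : PySem.Dict Int String :=
  ⟨[(1,"Jan"),(2,"Feb"),(3,"Mar"),(4,"Apr"),(5,"May"),(6,"Jun"),
    (7,"Jul"),(8,"Aug"),(9,"Sep"),(10,"Oct"),(11,"Nov"),(12,"Dec")]⟩

def pySeasons : List (String × List Int) :=
  [("Winter",[12,1,2]),("Spring",[3,4,5]),("Summer",[6,7,8]),("Fall",[9,10,11])]

-- literal port of A (SHORT_MONTHS[m] raises KeyError for m outside 1..12: excluded by Pre_)
def determine_season_py (months : List Int) : String :=
  if months = [] then "Year-round"
  else
    let season_scores : PySem.Dict String Int :=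
      pySeasons.foldl (fun d p =>
        PySem.Dict.insert d p.1
          (PySem.List.len (PySem.Set.inter (PySem.Set.ofList months) (PySem.Set.ofList p.2)))) ⟨[]⟩
    let best_season := (PySem.List.max? (PySem.Dict.keys season_scores)
        (fun k => PySem.Dict.getD season_scores k 0)).getD ""
    let month_names := (PySem.List.sorted months (fun x => x) false).map
        (fun m => PySem.Dict.getD pyShortMonths m "")
    if PySem.Dict.getD season_scores best_season 0 ≥ 2 then
      best_season ++ " (" ++ PySem.Str.join ", " month_names ++ ")"
    else
      PySem.Str.join ", " month_names

-- ===== PORT B =====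
-- one counting step of B's loop over the distinct months
def bStep (c : Int × Int × Int × Int) (m : Int) : Int × Int × Int × Int :=
  if m = 12 ∨ m ≤ 2 then (c.1 + 1, c.2.1, c.2.2.1, c.2.2.2)
  else if m ≤ 5 then (c.1, c.2.1 + 1, c.2.2.1, c.2.2.2)
  else if m ≤ 8 then (c.1, c.2.1, c.2.2.1 + 1, c.2.2.2)
  else if m ≤ 11 then (c.1, c.2.1, c.2.2.1, c.2.2.2 + 1)
  else c

-- B's first-maximal comparison chain
def bPick (w sp su f : Int) : String × Int :=
  if w ≥ sp ∧ w ≥ su ∧ w ≥ f then ("Winter", w)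
  else if sp ≥ su ∧ sp ≥ f then ("Spring", sp)
  else if su ≥ f then ("Summer", su)
  else ("Fall", f)

def determine_season_py_alt (months : List Int) : String :=
  if months = [] then "Year-round"
  else
    let c := (PySem.Set.ofList months).foldl bStep (0, 0, 0, 0)
    let bs := bPick c.1 c.2.1 c.2.2.1 c.2.2.2
    let names := PySem.Str.join ", "
        ((PySem.List.sorted months (fun x => x) false).map
          (fun m => PySem.Dict.getD pyShortMonths m ""))
    if bs.2 ≥ 2 then bs.1 ++ " (" ++ names ++ ")" else names

-- ===== PRECONDITION & SPEC =====
-- Pre_ excludes exactly the inputs where A raises: a nonempty list containing a month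
-- outside 1..12 makes SHORT_MONTHS[m] raise KeyError.
def Pre_determine_season_py (months : List Int) : Prop :=
  months = [] ∨ ∀ m ∈ months, 1 ≤ m ∧ m ≤ 12
instance (months : List Int) : Decidable (Pre_determine_season_py months) := by
  unfold Pre_determine_season_py; infer_instance
def pvWitness_determine_season_py : List Int := [6, 7, 8, 7, 1]

def Spec_determine_season_py (months : List Int) (out : String) : Prop := out = determine_season_py_alt months
instance (months : List Int) (out : String) : Decidable (Spec_determine_season_py months out) := by unfold Spec_determine_season_py; infer_instance

-- ===== CLAIM (what is proved, stated in full; the proofs are below) =====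
def Claim_equal_determine_season_py : Prop := ∀ (months : List Int), Dom_determine_season_py months → Pre_determine_season_py months → Spec_determine_season_py months (determine_season_py months)

-- ===== LEMMAS AND PROOFS =====

-- the literal dict A's score-building fold produces
def dct (a b c d : Int) : PySem.Dict String Int :=
  ⟨[("Winter", a), ("Spring", b), ("Summer", c), ("Fall", d)]⟩

lemma scores_eq (months : List Int) :
    pySeasons.foldl (fun d p =>
        PySem.Dict.insert d p.1
          (PySem.List.len (PySem.Set.inter (PySem.Set.ofList months) (PySem.Set.ofList p.2)))) ⟨[]⟩
      = dct (PySem.List.len (PySem.Set.inter (PySem.Set.ofList months) (PySem.Set.ofList [12,1,2])))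
            (PySem.List.len (PySem.Set.inter (PySem.Set.ofList months) (PySem.Set.ofList [3,4,5])))
            (PySem.List.len (PySem.Set.inter (PySem.Set.ofList months) (PySem.Set.ofList [6,7,8])))
            (PySem.List.len (PySem.Set.inter (PySem.Set.ofList months) (PySem.Set.ofList [9,10,11]))) := by
  rfl

-- B's counting loop computes the four range counts
lemma bStep_foldl (L : List Int) (w sp su f : Int) :
    L.foldl bStep (w, sp, su, f) =
      (w + L.countP (fun m => decide (m = 12 ∨ m ≤ 2)),
       sp + L.countP (fun m => decide (¬(m = 12 ∨ m ≤ 2) ∧ m ≤ 5)),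
       su + L.countP (fun m => decide (¬(m = 12 ∨ m ≤ 2) ∧ ¬ m ≤ 5 ∧ m ≤ 8)),
       f + L.countP (fun m => decide (¬(m = 12 ∨ m ≤ 2) ∧ ¬ m ≤ 5 ∧ ¬ m ≤ 8 ∧ m ≤ 11))) := by
  induction L generalizing w sp su f with
  | nil => simp
  | cons x L ih =>
    simp only [List.foldl_cons, List.countP_cons, bStep]
    by_cases h1 : x = 12 ∨ x ≤ 2
    · (simp [h1, ih]; try omega)
    · by_cases h2 : x ≤ 5
      · (simp [h1, h2, ih]; try omega)
      · by_cases h3 : x ≤ 8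
        · (simp [h1, h2, h3, ih]; try omega)
        · by_cases h4 : x ≤ 11
          · (simp [h1, h2, h3, h4, ih]; try omega)
          · (simp [h1, h2, h3, h4, ih]; try omega)

-- A's max(dict, key=get) plus the dict lookup equal B's comparison chain
lemma pick_eq (a b c d : Int) :
    (((PySem.List.max? (PySem.Dict.keys (dct a b c d))
        (fun k => PySem.Dict.getD (dct a b c d) k 0)).getD ""),
     PySem.Dict.getD (dct a b c d)
       ((PySem.List.max? (PySem.Dict.keys (dct a b c d))
          (fun k => PySem.Dict.getD (dct a b c d) k 0)).getD "") 0) = bPick a b c d := by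
  by_cases h1 : a < b <;> by_cases h2 : b < c <;> by_cases h3 : a < c <;>
    by_cases h4 : c < d <;> by_cases h5 : b < d <;> by_cases h6 : a < d <;>
    (simp [dct, PySem.List.max?, PySem.Dict.keys, PySem.Dict.getD, PySem.Dict.get?, bPick,
        h1, h2, h3, h4, h5, h6];
     try (split_ifs <;> first | rfl | omega))

-- the per-season overlap lengths equal B's range counts (months all in 1..12)
lemma overlap_eq (months : List Int) (hmem : ∀ m ∈ PySem.Set.ofList months, 1 ≤ m ∧ m ≤ 12) :
    PySem.List.len (PySem.Set.inter (PySem.Set.ofList months) (PySem.Set.ofList [12,1,2]))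
        = ((PySem.Set.ofList months).countP (fun m => decide (m = 12 ∨ m ≤ 2)) : Int)
    ∧ PySem.List.len (PySem.Set.inter (PySem.Set.ofList months) (PySem.Set.ofList [3,4,5]))
        = ((PySem.Set.ofList months).countP (fun m => decide (¬(m = 12 ∨ m ≤ 2) ∧ m ≤ 5)) : Int)
    ∧ PySem.List.len (PySem.Set.inter (PySem.Set.ofList months) (PySem.Set.ofList [6,7,8]))
        = ((PySem.Set.ofList months).countP (fun m => decide (¬(m = 12 ∨ m ≤ 2) ∧ ¬ m ≤ 5 ∧ m ≤ 8)) : Int)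
    ∧ PySem.List.len (PySem.Set.inter (PySem.Set.ofList months) (PySem.Set.ofList [9,10,11]))
        = ((PySem.Set.ofList months).countP (fun m => decide (¬(m = 12 ∨ m ≤ 2) ∧ ¬ m ≤ 5 ∧ ¬ m ≤ 8 ∧ m ≤ 11)) : Int) := by
  refine ⟨?_, ?_, ?_, ?_⟩ <;>
  · simp only [PySem.Set.inter, PySem.List.len_eq, ← List.countP_eq_length_filter]
    refine congrArg _ (List.countP_congr fun m hm => ?_)
    have h1 := (hmem m hm).1
    have h2 := (hmem m hm).2
    interval_cases m <;> decide

-- ===== VERDICT (by name: the statement is the Claim_ definition above) =====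
theorem determine_season_py_spec : Claim_equal_determine_season_py := by
  intro months _ hpre
  unfold Spec_determine_season_py
  by_cases hn : months = []
  · simp [determine_season_py, determine_season_py_alt, hn]
  · have hall : ∀ m ∈ months, 1 ≤ m ∧ m ≤ 12 := hpre.resolve_left hn
    have hmem : ∀ m ∈ PySem.Set.ofList months, 1 ≤ m ∧ m ≤ 12 := fun m hm =>
      hall m ((PySem.Set.mem_ofList months m).mp hm)
    obtain ⟨hW, hSp, hSu, hF⟩ := overlap_eq months hmem
    have hb := bStep_foldl (PySem.Set.ofList months) 0 0 0 0
    simp only [determine_season_py, determine_season_py_alt, if_neg hn,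
      scores_eq months, hW, hSp, hSu, hF, hb, zero_add]
    rw [← pick_eq]
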